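-- pv_equiv track=rewrite | github.com/varora24/adventofcode2021 | day3/programpt1.py | finddecimal
-- ===== SOURCE A (Python) =====
-- def finddecimal(binary):
--     binary1 = binary
--     decimal, i, n = 0, 0, 0
--     while(binary != 0):
--         dec = binary % 10
--         decimal = decimal + dec * pow(2, i)
--         binary = binary//10
--         i += 1
--     return decimal
-- ===== SOURCE B (Python) =====
-- def finddecimal(binary):
--     decimal = 0
--     for c in str(binary):
--         decimal = decimal * 2 + int(c)
--     return decimal
-- ===== Notes on version B (the rewrite author's own statement) =====
-- stated objective: idiomatic
-- what changed: Replaces A's LSB-first arithmetic loop (%10, //10, pow(2,i) with a position counter) by an MSB-first Horner pass over str(binary) (decimal = decimal*2 + int(c)), needing no index or power.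
import Mathlib
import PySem

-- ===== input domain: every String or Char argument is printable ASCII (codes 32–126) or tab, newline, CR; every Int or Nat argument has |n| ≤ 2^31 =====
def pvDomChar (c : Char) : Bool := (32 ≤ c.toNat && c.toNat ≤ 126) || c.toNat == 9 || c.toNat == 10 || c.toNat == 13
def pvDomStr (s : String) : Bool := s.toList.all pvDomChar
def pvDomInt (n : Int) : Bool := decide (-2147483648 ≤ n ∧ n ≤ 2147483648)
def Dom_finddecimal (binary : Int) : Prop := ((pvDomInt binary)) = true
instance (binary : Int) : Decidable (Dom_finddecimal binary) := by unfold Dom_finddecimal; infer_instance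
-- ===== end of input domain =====

-- B replaces A's LSB-first %10//10 loop with pow(2,i) by an MSB-first Horner pass over str(binary); idiomatic, same cost.
-- Pre_ excludes negative inputs, on which Python A never returns (infinite loop: binary//10 stalls at -1).


-- ===== PORT A =====
-- the while loop of A; Python's condition is `binary != 0`, but on binary < 0 Python never
-- returns (binary//10 stalls at -1), so those inputs are outside Pre_ and the port may stop there.
def finddecimalLoop (binary decimal i : Int) : Int :=
  if h : binary ≤ 0 then decimal
  else
    finddecimalLoop (PySem.Int.floordiv binary 10)
      (decimal + PySem.Int.mod binary 10 * 2 ^ i.toNat) (i + 1)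
termination_by binary.toNat
decreasing_by
  have : PySem.Int.floordiv binary 10 = binary / 10 := by
    simp [PySem.Int.floordiv, Int.fdiv_eq_ediv]
  rw [this]; omega

def finddecimal (binary : Int) : Int :=
  finddecimalLoop binary 0 0

-- ===== PORT B =====
-- `decimal*2 + int(c)` : int(c) is ported as c.toNat - 48, exact on the decimal-digit
-- characters which are the only characters of str(binary) for binary ≥ 0 (Pre_).
def finddecimal_alt (binary : Int) : Int :=
  (PySem.Int.toStr binary).toList.foldl (fun decimal c => decimal * 2 + ((c.toNat : Int) - 48)) 0

-- ===== PRECONDITION & SPEC =====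
-- Pre_ excludes binary < 0: there Python A loops forever (binary//10 stalls at -1 and never reaches 0).
def Pre_finddecimal (binary : Int) : Prop := 0 ≤ binary
instance (binary : Int) : Decidable (Pre_finddecimal binary) := by unfold Pre_finddecimal; infer_instance
def pvWitness_finddecimal : Int := (1234)

def Spec_finddecimal (binary : Int) (out : Int) : Prop := out = finddecimal_alt binary
instance (binary : Int) (out : Int) : Decidable (Spec_finddecimal binary out) := by unfold Spec_finddecimal; infer_instance

-- ===== CLAIM (what is proved, stated in full; the proofs are below) =====
def Claim_equal_finddecimal : Prop := ∀ (binary : Int), Dom_finddecimal binary → Pre_finddecimal binary → Spec_finddecimal binary (finddecimal binary)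

-- ===== LEMMAS AND PROOFS =====

-- reference value: binary-weight of the decimal digits of n
def pvF (n : Nat) : Int :=
  if n = 0 then 0 else ((n % 10 : Nat) : Int) + 2 * pvF (n / 10)
decreasing_by exact Nat.div_lt_self (Nat.pos_of_ne_zero (by assumption)) (by omega)

-- number of decimal digits of n (at least 1)
def pvK (n : Nat) : Nat :=
  if n / 10 = 0 then 1 else pvK (n / 10) + 1
decreasing_by exact Nat.div_lt_self (by omega) (by omega)

def pvStep (d : Int) (c : Char) : Int := d * 2 + ((c.toNat : Int) - 48)

lemma pvStep_digitChar (m : Nat) (hm : m < 10) (d : Int) :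
    pvStep d (Nat.digitChar m) = d * 2 + (m : Int) := by
  interval_cases m <;> rfl

-- Horner over toDigitsCore
lemma foldl_toDigitsCore (fuel : Nat) : ∀ (n : Nat) (acc : List Char) (d : Int), n < fuel →
    (Nat.toDigitsCore 10 fuel n acc).foldl pvStep d
      = acc.foldl pvStep (d * 2 ^ pvK n + pvF n) := by
  induction fuel with
  | zero => intro n acc d h; omega
  | succ f ih =>
    intro n acc d h
    rw [Nat.toDigitsCore]
    by_cases h0 : n / 10 = 0
    · simp only [h0, if_true, List.foldl]
      rw [pvStep_digitChar _ (Nat.mod_lt _ (by omega)) d]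
      rw [pvK, if_pos h0, pvF]
      by_cases hn : n = 0
      · simp [hn]
      · rw [if_neg hn, h0]
        rw [show pvF 0 = 0 by rw [pvF]; norm_num]
        push_cast
        ring_nf
    · simp only [h0, if_false]
      rw [ih (n / 10) _ d (by omega)]
      simp only [List.foldl]
      rw [pvStep_digitChar _ (Nat.mod_lt _ (by omega))]
      conv_rhs => rw [pvK, pvF]
      rw [if_neg h0, if_neg (show ¬ n = 0 by omega)]
      push_cast
      ring_nf

lemma alt_eq_pvF (binary : Int) (h : 0 ≤ binary) :
    finddecimal_alt binary = pvF binary.toNat := by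
  unfold finddecimal_alt
  rw [show (PySem.Int.toStr binary).toList = PySem.Int.toChars binary from
    PySem.Int.toList_toStr binary]
  unfold PySem.Int.toChars
  rw [if_neg (by omega)]
  show (Nat.toDigits 10 binary.toNat).foldl pvStep 0 = _
  unfold Nat.toDigits
  rw [foldl_toDigitsCore _ _ _ _ (by omega)]
  simp [List.foldl]

lemma loop_eq_pvF (fuel : Nat) : ∀ (binary decimal i : Int), binary.toNat ≤ fuel → 0 ≤ binary →
    0 ≤ i → finddecimalLoop binary decimal i = decimal + 2 ^ i.toNat * pvF binary.toNat := by
  induction fuel with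
  | zero =>
    intro b d i hb h0 hi
    unfold finddecimalLoop
    rw [dif_pos (by omega), pvF, if_pos (by omega)]
    ring
  | succ f ih =>
    intro b d i hb h0 hi
    by_cases hz : b ≤ 0
    · unfold finddecimalLoop
      rw [dif_pos hz, pvF, if_pos (by omega)]
      ring
    · unfold finddecimalLoop
      rw [dif_neg hz]
      have hfd : PySem.Int.floordiv b 10 = (b.toNat / 10 : Nat) := by
        simp [PySem.Int.floordiv, Int.fdiv_eq_ediv]
        omega
      rw [ih _ _ _ (by omega) (by omega) (by omega)]
      rw [hfd]
      have hmod : PySem.Int.mod b 10 = ((b.toNat % 10 : Nat) : Int) := by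
        simp [PySem.Int.mod, Int.fmod_eq_emod]
        omega
      rw [hmod]
      have hi1 : (i + 1).toNat = i.toNat + 1 := by omega
      rw [hi1, Int.toNat_natCast]
      rw [show pvF b.toNat = ((b.toNat % 10 : Nat) : Int) + 2 * pvF (b.toNat / 10) by
        rw [pvF, if_neg (by omega)]]
      push_cast
      ring

-- ===== VERDICT (by name: the statement is the Claim_ definition above) =====
theorem finddecimal_spec : Claim_equal_finddecimal := by
  intro binary _ hpre
  unfold Spec_finddecimal finddecimal
  rw [alt_eq_pvF binary hpre, loop_eq_pvF binary.toNat binary 0 0 le_rfl hpre le_rfl]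
  simp
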